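-- pv_equiv track=rewrite | github.com/NLPatVCU/PDFtoTextExtractor | src/Postprocess.py | finalprocessing
-- ===== SOURCE A (Python) =====
-- def finalprocessing(string):
--     i = 0
--     special_characters = "!@#$%^&*()+?_=,<>/\"\'[];-_–"
--     count = 0
--     while i + 3 < len(string):
--
--         # If there is a space and new line separating the characters joining them toghether because they are the same sentence
--         if (string[i].isupper() or string[i].islower() or any(c in special_characters for c in string[i]) or string[
--             i].isdigit()) \
--                 and string[i + 1] == " " and string[i + 2] == "\n" \
--                 and (string[i + 3].islower() or string[i + 3].isdigit()):
--             string = string[:i + 1] + " " + string[i + 3:]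
--         if string[i] == "." and string[i + 1].isspace() and string[i + 2] == "\n" and string[i + 3].isupper():
--             string = string[:i + 1] + " " + string[i + 3:]
--
--         i += 1
--
--     return string
-- ===== SOURCE B (Python) =====
-- def finalprocessing(string):
--     # Single forward pass with an output buffer; the cheap newline test is done
--     # first so almost every position is dismissed with one comparison.
--     special_characters = "!@#$%^&*()+?_=,<>/\"\'[];-_–"
--     out = []
--     i = 0
--     n = len(string)
--     while i < n:
--         if i + 3 < n and string[i + 2] == "\n":
--             c, x, d = string[i], string[i + 1], string[i + 3]
--             if (x == " " and (d.islower() or d.isdigit())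
--                     and (c.isupper() or c.islower() or c in special_characters or c.isdigit())) \
--                or (c == "." and x.isspace() and d.isupper()):
--                 out.append(c)
--                 out.append(" ")
--                 i += 3
--                 continue
--         out.append(string[i])
--         i += 1
--     return "".join(out)
-- ===== Notes on version B (the rewrite author's own statement) =====
-- stated objective: faster
-- what changed: A repeatedly rebuilds the whole string by slicing at every collapse while rescanning with a cursor; B makes one forward pass over the original string appending to an output buffer, dismissing almost every position with a single cheap newline comparison instead of A's several per-position char-class calls.
import Mathlib
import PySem

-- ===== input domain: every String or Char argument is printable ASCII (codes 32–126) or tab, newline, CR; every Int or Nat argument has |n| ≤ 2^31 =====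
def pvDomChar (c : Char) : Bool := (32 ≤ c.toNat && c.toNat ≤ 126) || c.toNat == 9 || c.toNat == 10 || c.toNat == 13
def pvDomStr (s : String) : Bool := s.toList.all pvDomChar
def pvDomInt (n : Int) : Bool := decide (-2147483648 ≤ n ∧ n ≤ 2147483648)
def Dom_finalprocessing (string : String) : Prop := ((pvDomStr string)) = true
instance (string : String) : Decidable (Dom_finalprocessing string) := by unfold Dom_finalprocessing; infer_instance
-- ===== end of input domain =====

-- B replaces A's slice-and-rebuild rescanning loop by a single forward pass with an
-- output buffer over the original string (objective: faster).


-- ===== PORT A =====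
-- special_characters = "!@#$%^&*()+?_=,<>/\"\'[];-_–"  (the last char is U+2013 EN DASH, as in A)
def pvSpecialChars : List Char := "!@#$%^&*()+?_=,<>/\"'[];-_–".toList

-- A's first if-condition on the 4-char window string[i..i+3]
-- ('any(c in special_characters for c in string[i])' over a 1-char string = membership of that char)
def pvCond1 (c x y d : Char) : Bool :=
  (PySem.Chars.isupper c || PySem.Chars.islower c || pvSpecialChars.contains c
      || PySem.Chars.isdigit c)
    && x == ' ' && y == '\n' && (PySem.Chars.islower d || PySem.Chars.isdigit d)

-- A's second if-condition on the 4-char window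
def pvCond2 (c x y d : Char) : Bool :=
  c == '.' && PySem.Chars.isspace x && y == '\n' && PySem.Chars.isupper d

-- A's while-loop over the mutable string (as List Char).  In-range reads use List.getD;
-- the only read Python could make out of range (string[i+3] in the second if after the first
-- if shrank the string) sits behind a short-circuited 'and' whose first conjunct
-- (string[i]==".") is then necessarily false, so the getD default never influences the
-- condition's value and Python raises nowhere.
-- string[:i+1] = take (i+1) and string[i+3:] = drop (i+3) exactly (indices >= 0).
def pvRebuild (s : List Char) (i : Nat) : List Char := s.take (i+1) ++ ' ' :: s.drop (i+3)

-- the first if: collapse when rule 1 matches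
def pvStep1 (s : List Char) (i : Nat) : List Char :=
  if pvCond1 (s.getD i ' ') (s.getD (i+1) ' ') (s.getD (i+2) ' ') (s.getD (i+3) ' ')
  then pvRebuild s i else s

-- the second if: collapse when rule 2 matches (on the possibly already rebuilt string)
def pvStep2 (s : List Char) (i : Nat) : List Char :=
  if pvCond2 (s.getD i ' ') (s.getD (i+1) ' ') (s.getD (i+2) ' ') (s.getD (i+3) ' ')
  then pvRebuild s i else s

-- length bounds the loop's termination argument cites
theorem pvStep1_len (s : List Char) (i : Nat) (h : i + 3 ≤ s.length) :
    s.length - 1 ≤ (pvStep1 s i).length ∧ (pvStep1 s i).length ≤ s.length := by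
  unfold pvStep1 pvRebuild; split <;> simp <;> omega

theorem pvStep2_len (s : List Char) (i : Nat) (h : i + 2 ≤ s.length) :
    (pvStep2 s i).length ≤ s.length := by
  unfold pvStep2 pvRebuild; split <;> simp <;> omega

def pvAloop (s : List Char) (i : Nat) : List Char :=
  if h : i + 3 < s.length then
    pvAloop (pvStep2 (pvStep1 s i) i) (i+1)
  else s
termination_by s.length - i
decreasing_by
  have h1 := pvStep1_len s i (by omega)
  have h2 := pvStep2_len (pvStep1 s i) i (by omega)
  omega

def finalprocessing (string : String) : String := String.ofList (pvAloop string.toList 0)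

-- ===== PORT B =====
-- Source B's single forward pass: cursor over the (immutable) input, output buffer; the cheap
-- newline test is done first; a matched window emits the lead char plus a space and jumps
-- past the collapsed pair.
def pvCond1' (c x d : Char) : Bool :=
  x == ' ' && (PySem.Chars.islower d || PySem.Chars.isdigit d)
    && (PySem.Chars.isupper c || PySem.Chars.islower c || pvSpecialChars.contains c
        || PySem.Chars.isdigit c)

def pvCond2' (c x d : Char) : Bool :=
  c == '.' && PySem.Chars.isspace x && PySem.Chars.isupper d

def pvBloop : List Char → List Char
  | c :: x :: y :: d :: r =>
      if y == '\n' then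
        if pvCond1' c x d || pvCond2' c x d then c :: ' ' :: pvBloop (d :: r)
        else c :: pvBloop (x :: y :: d :: r)
      else c :: pvBloop (x :: y :: d :: r)
  | c :: r => c :: pvBloop r
  | [] => []

def finalprocessing_alt (string : String) : String := String.ofList (pvBloop string.toList)

-- ===== PRECONDITION & SPEC =====
def Spec_finalprocessing (string : String) (out : String) : Prop := out = finalprocessing_alt string
instance (string : String) (out : String) : Decidable (Spec_finalprocessing string out) := by unfold Spec_finalprocessing; infer_instance

-- ===== CLAIM (what is proved, stated in full; the proofs are below) =====
def Claim_equal_finalprocessing : Prop := ∀ (string : String), Dom_finalprocessing string → Spec_finalprocessing string (finalprocessing string)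

-- ===== LEMMAS AND PROOFS =====

theorem pvBloop_short (xs : List Char) (h : xs.length < 4) : pvBloop xs = xs := by
  match xs, h with
  | [], _ => rfl
  | [a], _ => rfl
  | [a, b], _ => rfl
  | [a, b, c], _ => rfl


-- the two generic Boolean shapes of the two programs' window tests agree
theorem pvIfEq (A X Y D C2 S U : Bool) (e1 e2 : List Char) :
    (if Y then (if (X && D && A) || (C2 && S && U) then e1 else e2) else e2)
      = (if A && X && Y && D then e1 else if C2 && S && Y && U then e1 else e2) := by
  cases A <;> cases X <;> cases Y <;> cases D <;> cases C2 <;> cases S <;> cases U <;> rfl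

-- B's step on a full window, phrased with A's condition tests
theorem pvBloop_cons4 (c x y d : Char) (r : List Char) :
    pvBloop (c :: x :: y :: d :: r) =
      if pvCond1 c x y d then c :: ' ' :: pvBloop (d :: r)
      else if pvCond2 c x y d then c :: ' ' :: pvBloop (d :: r)
      else c :: pvBloop (x :: y :: d :: r) := by
  rw [pvBloop]
  unfold pvCond1' pvCond2' pvCond1 pvCond2
  exact pvIfEq _ _ _ _ _ _ _ _ _

-- a space never starts a match, so B copies it through
theorem pvBloop_space (xs : List Char) : pvBloop (' ' :: xs) = ' ' :: pvBloop xs := by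
  rcases xs with _ | ⟨x, _ | ⟨y, _ | ⟨d, r⟩⟩⟩
  · rfl
  · rfl
  · rfl
  · have hc1 : pvCond1 ' ' x y d = false := by
      unfold pvCond1
      rw [show (PySem.Chars.isupper ' ' || PySem.Chars.islower ' ' || pvSpecialChars.contains ' '
          || PySem.Chars.isdigit ' ') = false from by decide]
      rfl
    have hc2 : pvCond2 ' ' x y d = false := by
      unfold pvCond2
      rw [show (' ' == '.') = false from by decide]
      rfl
    rw [pvBloop_cons4, hc1, hc2]
    simp

-- if the 4th window char can end a rule-1 collapse it is not a newline
theorem pvNotNl (d : Char) (h : (PySem.Chars.islower d || PySem.Chars.isdigit d) = true) :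
    (d == '\n') = false := by
  by_contra hne
  simp at hne
  subst hne
  simp [PySem.Chars.islower, PySem.Chars.isdigit] at h

-- main invariant: A's loop from cursor i = the already-fixed prefix + B's pass on the suffix
theorem pvA_eq_B (n : Nat) : ∀ (s : List Char) (i : Nat), s.length - i = n →
    pvAloop s i = s.take i ++ pvBloop (s.drop i) := by
  induction n using Nat.strong_induction_on with
  | _ n ih =>
    intro s i hn
    rw [pvAloop]
    by_cases h : i + 3 < s.length
    · rw [dif_pos h]
      have hi0 : i < s.length := by omega
      have hi1 : i + 1 < s.length := by omega
      have hi2 : i + 2 < s.length := by omega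
      set c := s[i] with hc
      set x := s[i+1] with hx
      set y := s[i+2] with hy
      set d := s[i+3] with hd
      have g0 : s.getD i ' ' = c := List.getD_eq_getElem s ' ' hi0
      have g1 : s.getD (i+1) ' ' = x := List.getD_eq_getElem s ' ' hi1
      have g2 : s.getD (i+2) ' ' = y := List.getD_eq_getElem s ' ' hi2
      have g3 : s.getD (i+3) ' ' = d := List.getD_eq_getElem s ' ' h
      have hdrop : s.drop i = c :: x :: y :: d :: s.drop (i+4) := by
        rw [List.drop_eq_getElem_cons hi0, List.drop_eq_getElem_cons hi1,
            List.drop_eq_getElem_cons hi2, List.drop_eq_getElem_cons h]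
      have hdrop3 : s.drop (i+3) = d :: s.drop (i+4) := List.drop_eq_getElem_cons h
      have htklen : (s.take (i+1)).length = i + 1 := by simp; omega
      have htk : s.take (i+1) = s.take i ++ [c] := by
        rw [List.take_add_one, List.getElem?_eq_getElem hi0]
        simp [hc]
      have hreblen : (pvRebuild s i).length = s.length - 1 := by
        unfold pvRebuild; simp; omega
      have htake1 : (pvRebuild s i).take (i+1) = s.take (i+1) := by
        unfold pvRebuild
        rw [List.take_append_of_le_length (by simp; omega)]
        simp
      have hdrop1 : (pvRebuild s i).drop (i+1) = ' ' :: s.drop (i+3) := by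
        unfold pvRebuild
        rw [List.drop_append_of_le_length (by simp; omega)]
        simp
      unfold pvStep1 pvStep2
      simp only [g0, g1, g2, g3]
      by_cases hc1 : pvCond1 c x y d = true
      · -- first rule fires; the second cannot fire on the rebuilt string
        rw [if_pos hc1]
        have hs1 : (pvRebuild s i).getD (i+2) ' ' = d := by
          have hg : (pvRebuild s i)[i+2]? = some d := by
            unfold pvRebuild
            rw [List.getElem?_append_right (by omega)]
            simp [htklen, hdrop3]
          simp [List.getD, hg]
        have h4 := hc1
        unfold pvCond1 at h4
        simp only [Bool.and_eq_true] at h4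
        have hdnl : (d == '\n') = false := pvNotNl d h4.2
        have hcond2 : pvCond2 ((pvRebuild s i).getD i ' ') ((pvRebuild s i).getD (i+1) ' ')
            ((pvRebuild s i).getD (i+2) ' ') ((pvRebuild s i).getD (i+3) ' ') = false := by
          rw [hs1]
          simp [pvCond2, hdnl]
        rw [if_neg (by rw [hcond2]; simp)]
        rw [ih (s.length - 1 - (i+1)) (by omega) _ (i+1) (by rw [hreblen])]
        rw [htake1, hdrop1, pvBloop_space, hdrop, hdrop3]
        rw [pvBloop_cons4, if_pos hc1, htk]
        simp
      · rw [if_neg hc1]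
        simp only [g0, g1, g2, g3]
        by_cases hc2 : pvCond2 c x y d = true
        · -- second rule fires
          rw [if_pos hc2]
          rw [ih (s.length - 1 - (i+1)) (by omega) _ (i+1) (by rw [hreblen])]
          rw [htake1, hdrop1, pvBloop_space, hdrop, hdrop3]
          rw [pvBloop_cons4, if_neg hc1, if_pos hc2, htk]
          simp
        · -- no rule fires: plain step
          rw [if_neg hc2]
          rw [ih (s.length - (i+1)) (by omega) s (i+1) rfl]
          have hdropi1 : s.drop (i+1) = x :: y :: d :: s.drop (i+4) := by
            rw [List.drop_eq_getElem_cons hi1, List.drop_eq_getElem_cons hi2,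
                List.drop_eq_getElem_cons h]
          rw [hdrop, hdropi1, pvBloop_cons4, if_neg hc1, if_neg hc2, htk]
          simp
    · rw [dif_neg h]
      rw [pvBloop_short (s.drop i) (by simp; omega)]
      simp

-- ===== VERDICT (by name: the statement is the Claim_ definition above) =====
theorem finalprocessing_spec : Claim_equal_finalprocessing := by
  intro s _
  unfold Spec_finalprocessing finalprocessing finalprocessing_alt
  rw [pvA_eq_B (s.toList.length - 0) s.toList 0 rfl]
  simp
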